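-- pv_equiv track=rewrite | github.com/arushij06/Pyhton | codeforces problems/Elections.py | elections_winner
-- ===== SOURCE A (Python) =====
-- def city_elections(city):
--     city_winner = 0
--     max_votes = -1
--     for candidate in range(len(city)):
--         if max_votes < city[candidate]:
--             city_winner = candidate + 1
--             max_votes = city[candidate]
--     return city_winner
--
-- def elections_winner(voting_list):
--     cities_won = {}
--     max_winner = 0
--     for city in voting_list:
--         city_winner = city_elections(city)
--         cities_won[city_winner] = cities_won.get(city_winner, 0) + 1
--         if cities_won.get(max_winner, 0) < cities_won[city_winner]:
--             max_winner = city_winner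
--         elif cities_won.get(max_winner, 0) == cities_won[city_winner]:
--             if city_winner < max_winner:
--                 max_winner = city_winner
--     return max_winner
-- ===== SOURCE B (Python) =====
-- def city_elections(city):
--     city_winner = 0
--     max_votes = -1
--     for candidate in range(len(city)):
--         if max_votes < city[candidate]:
--             city_winner = candidate + 1
--             max_votes = city[candidate]
--     return city_winner
--
-- def elections_winner(voting_list):
--     winners = sorted(city_elections(city) for city in voting_list)
--     best = 0
--     best_len = 0
--     i = 0
--     while i < len(winners):
--         j = i
--         while j < len(winners) and winners[j] == winners[i]:
--             j += 1
--         if j - i > best_len: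
--             best, best_len = winners[i], j - i
--         i = j
--     return best
-- ===== Notes on version B (the rewrite author's own statement) =====
-- stated objective: alternative
-- what changed: elections_winner's running-leader-with-dict loop is replaced by a tally-then-select decomposition: map each city to its winner, sort the winner labels, and scan the sorted list's runs once, keeping the first (smallest) label with the longest run; city_elections is kept unchanged.
import Mathlib
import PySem

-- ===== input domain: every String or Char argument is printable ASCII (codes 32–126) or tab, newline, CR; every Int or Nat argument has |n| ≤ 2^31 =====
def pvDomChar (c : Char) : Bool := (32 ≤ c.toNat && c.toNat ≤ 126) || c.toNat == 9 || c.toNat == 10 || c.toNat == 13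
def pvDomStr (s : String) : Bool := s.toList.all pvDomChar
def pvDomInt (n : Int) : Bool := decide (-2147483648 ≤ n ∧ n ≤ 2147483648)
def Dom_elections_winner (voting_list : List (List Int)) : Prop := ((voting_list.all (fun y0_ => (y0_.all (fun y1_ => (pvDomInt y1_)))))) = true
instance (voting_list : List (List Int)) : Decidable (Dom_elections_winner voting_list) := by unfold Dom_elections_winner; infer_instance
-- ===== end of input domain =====

-- B replaces A's running-leader-with-dict tally in elections_winner by map-to-winners, sort, and a
-- single run-scan of the sorted labels (city_elections is shared verbatim); objective: alternative.


-- ===== PORT A =====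
-- helper shared verbatim by A and B (Source B keeps city_elections unchanged)
def city_elections (city : List Int) : Int :=
  ((PySem.List.pyRange 0 (city.length) 1).foldl
    (fun (s : Int × Int) candidate =>
      if s.2 < PySem.List.pyGetD city candidate 0 then
        (candidate + 1, PySem.List.pyGetD city candidate 0)
      else s) (0, -1)).1

-- one iteration of A's loop: update the dict, then the running leader
def ewStep (s : PySem.Dict Int Int × Int) (city : List Int) : PySem.Dict Int Int × Int :=
  let w := city_elections city
  let d := s.1.insert w (s.1.getD w 0 + 1)
  let mw := if d.getD s.2 0 < d.getD w 0 then w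
            else if d.getD s.2 0 = d.getD w 0 then (if w < s.2 then w else s.2)
            else s.2
  (d, mw)

def elections_winner (voting_list : List (List Int)) : Int :=
  (voting_list.foldl ewStep (PySem.Dict.empty, 0)).2

-- ===== PORT B =====
-- Source B's outer while loop over the sorted winners; the inner 'while winners[j] == winners[i]'
-- advance is the takeWhile/dropWhile split of the current run (exact: j - i = run length)
def ewRuns : List Int → Int → Int → Int
  | [], best, _ => best
  | x :: rest, best, bestLen =>
    let run : Int := ((rest.takeWhile (· == x)).length : Int) + 1
    let rest' := rest.dropWhile (· == x)
    if bestLen < run then ewRuns rest' x run else ewRuns rest' best bestLen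
termination_by s _ _ => s.length
decreasing_by all_goals exact Nat.lt_succ_of_le (List.length_dropWhile_le _ _)

def elections_winner_alt (voting_list : List (List Int)) : Int :=
  ewRuns (PySem.List.sorted (voting_list.map city_elections) (fun x => x) false) 0 0

-- ===== PRECONDITION & SPEC =====
def Spec_elections_winner (voting_list : List (List Int)) (out : Int) : Prop := out = elections_winner_alt voting_list
instance (voting_list : List (List Int)) (out : Int) : Decidable (Spec_elections_winner voting_list out) := by unfold Spec_elections_winner; infer_instance

-- ===== CLAIM (what is proved, stated in full; the proofs are below) =====
def Claim_equal_elections_winner : Prop := ∀ (voting_list : List (List Int)), Dom_elections_winner voting_list → Spec_elections_winner voting_list (elections_winner voting_list)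

-- ===== LEMMAS AND PROOFS =====

-- r is the label winning the most cities in ws, ties toward the smaller label; 0 for no cities
def IsBest (ws : List Int) (r : Int) : Prop :=
  (ws = [] ∧ r = 0) ∨
  (r ∈ ws ∧ ∀ c ∈ ws, ws.count c < ws.count r ∨ (ws.count c = ws.count r ∧ r ≤ c))

lemma isBest_unique (ws : List Int) (r1 r2 : Int) (h1 : IsBest ws r1) (h2 : IsBest ws r2) :
    r1 = r2 := by
  rcases h1 with ⟨hn, h1⟩ | ⟨hm1, h1⟩
  · rcases h2 with ⟨_, h2⟩ | ⟨hm2, _⟩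
    · omega
    · subst hn; simp at hm2
  · rcases h2 with ⟨hn, _⟩ | ⟨hm2, h2⟩
    · subst hn; simp at hm1
    · rcases h1 r2 hm2 with h | ⟨hc, hle⟩ <;> rcases h2 r1 hm1 with h' | ⟨hc', hle'⟩ <;> omega

-- one tally step of A preserves IsBest (abstracted on the counts)
lemma step_best (ws : List Int) (w L : Int) (hb : IsBest ws L) :
    IsBest (ws ++ [w])
      (if (if L = w then (ws.count w : Int) + 1 else (ws.count L : Int)) < (ws.count w : Int) + 1 then w
       else if (if L = w then (ws.count w : Int) + 1 else (ws.count L : Int)) = (ws.count w : Int) + 1 then (if w < L then w else L)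
       else L) := by
  have hcnt : ∀ c : Int, (ws ++ [w]).count c = ws.count c + if c = w then 1 else 0 := by
    intro c
    by_cases h : c = w
    · subst h; simp [List.count_append]
    · simp [List.count_append, h, Ne.symm h]
  rcases hb with ⟨hn, hL0⟩ | ⟨hmem, hbest⟩
  · -- no city yet: ws = [], L = 0
    subst hn hL0
    have key : IsBest (([] : List Int) ++ [w]) w := by
      refine Or.inr ⟨by simp, ?_⟩
      intro c hc
      simp at hc
      subst hc
      exact Or.inr ⟨rfl, le_refl _⟩
    by_cases hw : (0 : Int) = w
    · subst hw
      split_ifs <;> exact key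
    · have h1 : (if (0 : Int) = w then (List.count w ([] : List Int) : Int) + 1
          else (List.count (0 : Int) ([] : List Int) : Int)) < (List.count w ([] : List Int) : Int) + 1 := by
        simp [hw]
      rw [if_pos h1]
      exact key
  · -- L is the current best of a nonempty ws
    have hLpos : 0 < ws.count L := List.count_pos_iff.mpr hmem
    by_cases hLw : L = w
    · -- the incremented label is the leader itself
      subst hLw
      have key : IsBest (ws ++ [L]) L := by
        refine Or.inr ⟨List.mem_append_left _ hmem, ?_⟩
        intro c hc
        rw [hcnt c, hcnt L]
        by_cases hcL : c = L
        · subst hcL; exact Or.inr ⟨rfl, le_refl _⟩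
        · have hcm : c ∈ ws := by
            rcases List.mem_append.mp hc with h | h
            · exact h
            · simp at h; exact absurd h hcL
          rcases hbest c hcm with h | ⟨h, hle⟩
          · exact Or.inl (by simp [hcL]; omega)
          · exact Or.inl (by simp [hcL]; omega)
      split_ifs <;> exact key
    · -- leader differs from the incremented label
      have hwle : ws.count w ≤ ws.count L := by
        by_cases hwm : w ∈ ws
        · rcases hbest w hwm with h | ⟨h, _⟩ <;> omega
        · have : ws.count w = 0 := List.count_eq_zero.mpr hwm
          omega
      rw [if_neg hLw]
      by_cases h1 : (ws.count L : Int) < (ws.count w : Int) + 1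
      · -- counts were tied; w overtakes strictly
        rw [if_pos h1]
        refine Or.inr ⟨List.mem_append_right _ (by simp), ?_⟩
        intro c hc
        rw [hcnt c, hcnt w]
        by_cases hcw : c = w
        · subst hcw; exact Or.inr ⟨rfl, le_refl _⟩
        · have hcm : c ∈ ws := by
            rcases List.mem_append.mp hc with h | h
            · exact h
            · simp at h; exact absurd h hcw
          rcases hbest c hcm with h | ⟨h, _⟩
          · exact Or.inl (by simp [hcw]; omega)
          · exact Or.inl (by simp [hcw]; omega)
      · rw [if_neg h1]
        by_cases h2 : (ws.count L : Int) = (ws.count w : Int) + 1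
        · -- w reaches the leader's count; tie-break to the smaller label
          rw [if_pos h2]
          by_cases h3 : w < L
          · rw [if_pos h3]
            refine Or.inr ⟨List.mem_append_right _ (by simp), ?_⟩
            intro c hc
            rw [hcnt c, hcnt w]
            by_cases hcw : c = w
            · subst hcw; exact Or.inr ⟨rfl, le_refl _⟩
            · have hcm : c ∈ ws := by
                rcases List.mem_append.mp hc with h | h
                · exact h
                · simp at h; exact absurd h hcw
              rcases hbest c hcm with h | ⟨h, hle⟩
              · exact Or.inl (by simp [hcw]; omega)
              · exact Or.inr ⟨by simp [hcw]; omega, le_of_lt (lt_of_lt_of_le h3 hle)⟩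
          · rw [if_neg h3]
            refine Or.inr ⟨List.mem_append_left _ hmem, ?_⟩
            intro c hc
            rw [hcnt c, hcnt L]
            by_cases hcL : c = L
            · subst hcL; exact Or.inr ⟨rfl, le_refl _⟩
            · by_cases hcw : c = w
              · subst hcw
                exact Or.inr ⟨by simp [hLw]; omega, not_lt.mp h3⟩
              · have hcm : c ∈ ws := by
                  rcases List.mem_append.mp hc with h | h
                  · exact h
                  · simp at h; exact absurd h hcw
                rcases hbest c hcm with h | ⟨h, hle⟩
                · exact Or.inl (by simp [hcw, hLw]; omega)
                · exact Or.inr ⟨by simp [hcw, hLw]; omega, hle⟩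
        · -- leader stays strictly ahead
          rw [if_neg h2]
          refine Or.inr ⟨List.mem_append_left _ hmem, ?_⟩
          intro c hc
          rw [hcnt c, hcnt L]
          by_cases hcL : c = L
          · subst hcL; exact Or.inr ⟨rfl, le_refl _⟩
          · by_cases hcw : c = w
            · subst hcw
              exact Or.inl (by simp [hLw]; omega)
            · have hcm : c ∈ ws := by
                rcases List.mem_append.mp hc with h | h
                · exact h
                · simp at h; exact absurd h hcw
              rcases hbest c hcm with h | ⟨h, hle⟩
              · exact Or.inl (by simp [hcw, hLw]; omega)
              · exact Or.inr ⟨by simp [hcw, hLw]; omega, hle⟩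

-- A-side fold invariant: the dict holds the counts and the second component is the leader
lemma stA_spec (vl : List (List Int)) :
    (∀ c, (vl.foldl ewStep (PySem.Dict.empty, 0)).1.getD c 0
        = (((vl.map city_elections).count c : Int))) ∧
    IsBest (vl.map city_elections) (vl.foldl ewStep (PySem.Dict.empty, 0)).2 := by
  induction vl using List.reverseRecOn with
  | nil =>
    refine ⟨fun c => by simp [PySem.Dict.getD_empty], Or.inl ⟨rfl, rfl⟩⟩
  | append_singleton vl city ih =>
    obtain ⟨hc, hb⟩ := ih
    rw [List.foldl_append]
    set st := vl.foldl ewStep (PySem.Dict.empty, 0) with hst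
    set w := city_elections city with hw
    set ws := vl.map city_elections with hws
    have hmap : (vl ++ [city]).map city_elections = ws ++ [w] := by simp [hws, hw]
    rw [hmap, List.foldl_cons, List.foldl_nil]
    have hd : ∀ c, (ewStep st city).1.getD c 0
        = if c = w then (ws.count w : Int) + 1 else (ws.count c : Int) := by
      intro c
      simp only [ewStep]
      rw [PySem.Dict.getD_insert]
      split_ifs with h
      · rw [hc w]
      · rw [hc c]
    have h2 : (ewStep st city).2
        = (if (if st.2 = w then (ws.count w : Int) + 1 else (ws.count st.2 : Int)) < (ws.count w : Int) + 1 then w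
           else if (if st.2 = w then (ws.count w : Int) + 1 else (ws.count st.2 : Int)) = (ws.count w : Int) + 1 then (if w < st.2 then w else st.2)
           else st.2) := by
      simp only [ewStep]
      rw [PySem.Dict.getD_insert_self, PySem.Dict.getD_insert, hc w, hc st.2]
    constructor
    · intro c
      rw [hd c]
      by_cases h : c = w
      · subst h; simp [List.count_append]
      · simp [List.count_append, h, Ne.symm h]
    · rw [h2]
      exact step_best ws w st.2 hb

-- In a sorted tail rest whose elements dominate x: the takeWhile run is all the x's,
-- the dropWhile remainder is strictly above x, still sorted, with the other counts intact
lemma run_split (x : Int) (rest : List Int) (hall : ∀ y ∈ rest, x ≤ y)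
    (hp : rest.Pairwise (· ≤ ·)) :
    (rest.takeWhile (· == x)).length = rest.count x ∧
    (∀ y ∈ rest.dropWhile (· == x), x < y) ∧
    (rest.dropWhile (· == x)).Pairwise (· ≤ ·) ∧
    (∀ c, c ≠ x → (rest.dropWhile (· == x)).count c = rest.count c) := by
  induction rest with
  | nil => simp
  | cons y t ih =>
    rw [List.pairwise_cons] at hp
    obtain ⟨hhead, hpt⟩ := hp
    by_cases hyx : y = x
    · subst hyx
      have hallt : ∀ z ∈ t, y ≤ z := fun z hz => hall z (List.mem_cons_of_mem _ hz)
      obtain ⟨h1, h2, h3, h4⟩ := ih hallt hpt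
      refine ⟨?_, ?_, ?_, ?_⟩
      · simp [List.takeWhile_cons, List.count_cons_self, h1]
      · simpa [List.dropWhile_cons] using h2
      · simpa [List.dropWhile_cons] using h3
      · intro c hc
        rw [List.dropWhile_cons_of_pos (by simp)]
        simp [List.count_cons, Ne.symm hc]
        exact h4 c hc
    · have hxy : x < y := lt_of_le_of_ne (hall y (List.mem_cons_self)) (Ne.symm hyx)
      have hne : (y == x) = false := by simp [hyx]
      have hnotmem : x ∉ y :: t := by
        intro hm
        rcases List.mem_cons.mp hm with h | h
        · exact hyx h.symm
        · exact absurd (hhead x h) (not_le.mpr hxy)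
      refine ⟨?_, ?_, ?_, ?_⟩
      · simp [List.takeWhile_cons, hne, List.count_eq_zero.mpr hnotmem]
      · intro z hz
        rw [List.dropWhile_cons_of_neg (by simp [hyx])] at hz
        rcases List.mem_cons.mp hz with h | h
        · exact h ▸ hxy
        · exact lt_of_lt_of_le hxy (hhead z h)
      · rw [List.dropWhile_cons_of_neg (by simp [hyx])]
        exact List.pairwise_cons.mpr ⟨hhead, hpt⟩
      · intro c hc
        rw [List.dropWhile_cons_of_neg (by simp [hyx])]

-- unfolding equation of the run scan
lemma ewRuns_cons (x : Int) (rest : List Int) (best bestLen : Int) :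
    ewRuns (x :: rest) best bestLen =
      if bestLen < ((rest.takeWhile (· == x)).length : Int) + 1 then
        ewRuns (rest.dropWhile (· == x)) x (((rest.takeWhile (· == x)).length : Int) + 1)
      else ewRuns (rest.dropWhile (· == x)) best bestLen := by
  rw [ewRuns]

-- B-side scan invariant
lemma ewRuns_spec (n : Nat) (s : List Int) (hn : s.length ≤ n) (best bestLen : Int)
    (hp : s.Pairwise (· ≤ ·)) :
    (ewRuns s best bestLen = best ∧ ∀ c ∈ s, (s.count c : Int) ≤ bestLen) ∨
    (ewRuns s best bestLen ∈ s ∧ bestLen < (s.count (ewRuns s best bestLen) : Int) ∧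
      ∀ c ∈ s, s.count c < s.count (ewRuns s best bestLen) ∨
        (s.count c = s.count (ewRuns s best bestLen) ∧ ewRuns s best bestLen ≤ c)) := by
  induction n generalizing s best bestLen with
  | zero =>
    have : s = [] := List.length_eq_zero_iff.mp (Nat.le_zero.mp hn)
    subst this
    exact Or.inl ⟨by simp [ewRuns], by simp⟩
  | succ n ih =>
    rcases s with _ | ⟨x, rest⟩
    · exact Or.inl ⟨by simp [ewRuns], by simp⟩
    · rw [List.pairwise_cons] at hp
      obtain ⟨hhead, hpt⟩ := hp
      obtain ⟨h1, h2, h3, h4⟩ := run_split x rest hhead hpt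
      set rest' := rest.dropWhile (· == x) with hrest'
      have hlen' : rest'.length ≤ n := by
        have hA : rest'.length ≤ rest.length := List.length_dropWhile_le _ _
        have hB : rest.length + 1 ≤ n + 1 := by simpa using hn
        omega
      have hrunval : ((rest.takeWhile (· == x)).length : Int) + 1 = ((x :: rest).count x : Int) := by
        rw [h1, List.count_cons_self]; push_cast; ring
      -- membership transfer: c ∈ x :: rest, c ≠ x → c ∈ rest'
      have hmem' : ∀ c, c ∈ x :: rest → c ≠ x → c ∈ rest' := by
        intro c hc hcx
        rcases List.mem_cons.mp hc with h | h
        · exact absurd h hcx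
        · have : 0 < rest.count c := List.count_pos_iff.mpr h
          have := h4 c hcx
          exact List.count_pos_iff.mp (by omega)
      have hmem'' : ∀ c, c ∈ rest' → c ∈ x :: rest :=
        fun c hc => List.mem_cons_of_mem _ ((List.dropWhile_sublist _).subset hc)
      have hcnt : ∀ c, c ≠ x → rest'.count c = (x :: rest).count c := by
        intro c hcx
        rw [h4 c hcx]
        simp [List.count_cons, Ne.symm hcx]
      rw [ewRuns_cons, ← hrest']
      split_ifs with hlt
      · -- run is longer: the scan switches to (x, run)
        rcases ih rest' hlen' x (((rest.takeWhile (· == x)).length : Int) + 1) h3 with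
          ⟨hr, hallA⟩ | ⟨hmemB, hgtB, hbestB⟩
        · refine Or.inr ⟨by simp [hr], ?_, ?_⟩
          · rw [hr, ← hrunval]; exact hlt
          · intro c hc
            rw [hr]
            by_cases hcx : c = x
            · exact Or.inr ⟨by rw [hcx], le_of_eq hcx.symm⟩
            · have hcm : c ∈ rest' := hmem' c hc hcx
              have h5 := hallA c hcm
              have h6 := hcnt c hcx
              have h7 : x < c := h2 c hcm
              have h8 : ((x :: rest).count c : Int) ≤ ((x :: rest).count x : Int) := by
                rw [← h6, ← hrunval]; exact h5
              rcases lt_or_eq_of_le h8 with h9 | h9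
              · exact Or.inl (by exact_mod_cast h9)
              · exact Or.inr ⟨by exact_mod_cast h9, le_of_lt h7⟩
        · set r := ewRuns rest' x (((rest.takeWhile (· == x)).length : Int) + 1) with hrdef
          have hrx : x < r := h2 r hmemB
          have hrne : r ≠ x := ne_of_gt hrx
          have hrc : rest'.count r = (x :: rest).count r := hcnt r hrne
          refine Or.inr ⟨hmem'' r hmemB, ?_, ?_⟩
          · rw [← hrc]; omega
          · intro c hc
            by_cases hcx : c = x
            · refine Or.inl ?_
              have h9 : ((x :: rest).count x : Int) < ((x :: rest).count r : Int) := by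
                rw [← hrunval, ← hrc]; omega
              rw [hcx]
              exact_mod_cast h9
            · have hcm : c ∈ rest' := hmem' c hc hcx
              rcases hbestB c hcm with h9 | ⟨h9, h10⟩
              · exact Or.inl (by rw [← hrc, ← hcnt c hcx]; exact h9)
              · exact Or.inr ⟨by rw [← hrc, ← hcnt c hcx]; exact h9, h10⟩
      · -- run not longer: state unchanged
        rcases ih rest' hlen' best bestLen h3 with
          ⟨hr, hallA⟩ | ⟨hmemB, hgtB, hbestB⟩
        · refine Or.inl ⟨hr, ?_⟩
          intro c hc
          by_cases hcx : c = x
          · rw [hcx, ← hrunval]; omega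
          · rw [← hcnt c hcx]; exact hallA c (hmem' c hc hcx)
        · set r := ewRuns rest' best bestLen with hrdef
          have hrx : x < r := h2 r hmemB
          have hrne : r ≠ x := ne_of_gt hrx
          have hrc : rest'.count r = (x :: rest).count r := hcnt r hrne
          refine Or.inr ⟨hmem'' r hmemB, by rw [← hrc]; omega, ?_⟩
          intro c hc
          by_cases hcx : c = x
          · refine Or.inl ?_
            have h9 : ((x :: rest).count x : Int) < ((x :: rest).count r : Int) := by
              rw [← hrunval, ← hrc]; omega
            rw [hcx]
            exact_mod_cast h9
          · have hcm : c ∈ rest' := hmem' c hc hcx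
            rcases hbestB c hcm with h9 | ⟨h9, h10⟩
            · exact Or.inl (by rw [← hrc, ← hcnt c hcx]; exact h9)
            · exact Or.inr ⟨by rw [← hrc, ← hcnt c hcx]; exact h9, h10⟩

-- ===== VERDICT (by name: the statement is the Claim_ definition above) =====
theorem elections_winner_spec : Claim_equal_elections_winner := by
  intro vl _
  unfold Spec_elections_winner elections_winner elections_winner_alt
  have hA := (stA_spec vl).2
  set ws := vl.map city_elections with hws
  set s := PySem.List.sorted ws (fun x => x) false with hs
  have hperm : s.Perm ws := PySem.List.sorted_perm ws (fun x => x) false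
  have hp : s.Pairwise (· ≤ ·) := PySem.List.sorted_pairwise ws (fun x => x)
  have hB : IsBest ws (ewRuns s 0 0) := by
    rcases ewRuns_spec s.length s le_rfl 0 0 hp with ⟨hr, hall⟩ | ⟨hmem, _, hbest⟩
    · have hsnil : s = [] := by
        rcases s with _ | ⟨a, t⟩
        · rfl
        · have := hall a (by simp)
          simp [List.count_cons_self] at this
          omega
      have : ws = [] := by rw [hsnil] at hperm; exact hperm.symm.eq_nil
      exact Or.inl ⟨this, hr⟩
    · refine Or.inr ⟨hperm.mem_iff.mp hmem, ?_⟩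
      intro c hc
      have hc' : c ∈ s := hperm.mem_iff.mpr hc
      rcases hbest c hc' with h | ⟨h, hle⟩
      · exact Or.inl (by rw [← hperm.count_eq, ← hperm.count_eq]; exact h)
      · exact Or.inr ⟨by rw [← hperm.count_eq, ← hperm.count_eq]; exact h, hle⟩
  exact isBest_unique ws _ _ hA hB
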